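-- pv_equiv track=rewrite | github.com/jeremylongshore/plugins-nixtla | 005-plugins/changelog-automation/scripts/changelog_mcp.py | _infer_type_from_subject
-- ===== SOURCE A (Python) =====
-- def _infer_type_from_subject(subject: str) -> str:
--     """Infer changelog type from a Conventional Commits-style subject."""
--     s = subject.lower().strip()
--     for prefix, kind in [
--         ("feat", "feature"),
--         ("fix", "fix"),
--         ("docs", "docs"),
--         ("chore", "chore"),
--         ("refactor", "chore"),
--         ("perf", "feature"),
--         ("breaking", "breaking"),
--     ]:
--         if s.startswith(prefix + ":") or s.startswith(prefix + "("):
--             return kind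
--     return "chore"
-- ===== SOURCE B (Python) =====
-- def _infer_type_from_subject(subject: str) -> str:
--     """Infer changelog type from a Conventional Commits-style subject."""
--     s = subject.lower().strip()
--     tok = []
--     for ch in s:
--         if ch in ":(":
--             return {
--                 "feat": "feature",
--                 "fix": "fix",
--                 "docs": "docs",
--                 "chore": "chore",
--                 "refactor": "chore",
--                 "perf": "feature",
--                 "breaking": "breaking",
--             }.get("".join(tok), "chore")
--         tok.append(ch)
--     return "chore"
-- ===== Notes on version B (the rewrite author's own statement) =====
-- stated objective: alternative
-- what changed: Instead of testing the subject against seven prefix+delimiter candidates in order, B scans the string once to the first ':' or '(' and looks the token before it up in a dict with default 'chore'.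
import Mathlib
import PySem

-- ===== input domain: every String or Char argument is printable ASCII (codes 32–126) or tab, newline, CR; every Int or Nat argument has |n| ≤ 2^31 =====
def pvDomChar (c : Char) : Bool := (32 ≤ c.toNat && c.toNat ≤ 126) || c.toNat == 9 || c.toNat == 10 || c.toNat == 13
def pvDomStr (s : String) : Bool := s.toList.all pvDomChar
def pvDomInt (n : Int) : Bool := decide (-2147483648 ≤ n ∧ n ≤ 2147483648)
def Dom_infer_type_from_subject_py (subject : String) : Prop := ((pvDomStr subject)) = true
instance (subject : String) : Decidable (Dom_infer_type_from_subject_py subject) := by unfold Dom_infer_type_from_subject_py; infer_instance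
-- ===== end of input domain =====

-- B scans the subject once for the first ':' or '(' and looks the preceding token up in a table, instead of A's seven prefix tests; return values proved equal everywhere.

-- ===== PORT A =====
-- the (prefix, kind) list A iterates over, in A's order
def aPairs : List (String × String) :=
  [("feat", "feature"), ("fix", "fix"), ("docs", "docs"), ("chore", "chore"),
   ("refactor", "chore"), ("perf", "feature"), ("breaking", "breaking")]

-- A's for-loop with early return
def aLoop (s : String) : List (String × String) → String
  | [] => "chore"
  | (p, k) :: rest =>
    if PySem.Str.startswith s (p ++ ":") || PySem.Str.startswith s (p ++ "(") then k
    else aLoop s rest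

def infer_type_from_subject_py (subject : String) : String :=
  aLoop (PySem.Str.strip (PySem.Str.lower subject)) aPairs

-- ===== PORT B =====
-- B's dict literal
def bTable : PySem.Dict String String :=
  PySem.Dict.ofList
    [("feat", "feature"), ("fix", "fix"), ("docs", "docs"), ("chore", "chore"),
     ("refactor", "chore"), ("perf", "feature"), ("breaking", "breaking")]

-- B's for-loop over the characters of s, accumulating tok; returns the dict lookup at the first delimiter
def bLoop : List Char → List Char → String
  | [], _ => "chore"
  | c :: cs, tok =>
    if c = ':' ∨ c = '(' then bTable.getD (String.ofList tok) "chore"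
    else bLoop cs (tok ++ [c])

def infer_type_from_subject_py_alt (subject : String) : String :=
  bLoop (PySem.Str.strip (PySem.Str.lower subject)).toList []

-- ===== PRECONDITION & SPEC =====
def Spec_infer_type_from_subject_py (subject : String) (out : String) : Prop := out = infer_type_from_subject_py_alt subject
instance (subject : String) (out : String) : Decidable (Spec_infer_type_from_subject_py subject out) := by unfold Spec_infer_type_from_subject_py; infer_instance

-- ===== CLAIM (what is proved, stated in full; the proofs are below) =====
def Claim_equal_infer_type_from_subject_py : Prop := ∀ (subject : String), Dom_infer_type_from_subject_py subject → Spec_infer_type_from_subject_py subject (infer_type_from_subject_py subject)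

-- ===== LEMMAS AND PROOFS =====

-- the token before the first delimiter, none if no delimiter occurs
def tok? : List Char → Option (List Char)
  | [] => none
  | c :: cs => if c = ':' ∨ c = '(' then some [] else (tok? cs).map (c :: ·)

theorem bLoop_eq (l : List Char) : ∀ tok, bLoop l tok =
    match tok? l with
    | none => "chore"
    | some t => bTable.getD (String.ofList (tok ++ t)) "chore" := by
  induction l with
  | nil => intro tok; simp [bLoop, tok?]
  | cons c cs ih =>
    intro tok
    by_cases h : c = ':' ∨ c = '('
    · simp [bLoop, tok?, h]
    · simp only [bLoop, tok?, if_neg h, ih]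
      cases tok? cs with
      | none => rfl
      | some t => simp [List.append_assoc]

theorem prefix_iff (p : List Char) : ∀ (l : List Char), (∀ c ∈ p, ¬(c = ':' ∨ c = '(')) →
    (((p ++ [':']) <+: l) ∨ ((p ++ ['(']) <+: l) ↔ tok? l = some p) := by
  induction p with
  | nil =>
    intro l _
    cases l with
    | nil => simp [tok?]
    | cons c cs =>
      by_cases h : c = ':' ∨ c = '('
      · simp [tok?, h]
        rcases h with h | h <;> simp [h]
      · simp [tok?, h]
        exact ⟨fun h1 => h (Or.inl h1.symm), fun h1 => h (Or.inr h1.symm)⟩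
  | cons a p ih =>
    intro l hnd
    have ha : ¬(a = ':' ∨ a = '(') := hnd a (by simp)
    cases l with
    | nil => simp [tok?]
    | cons c cs =>
      simp only [List.cons_append, List.cons_prefix_cons, tok?]
      by_cases hc : c = ':' ∨ c = '('
      · rw [if_pos hc]
        constructor
        · rintro (⟨h1, -⟩ | ⟨h1, -⟩) <;> exact absurd (h1 ▸ hc) ha
        · intro h; simp at h
      · rw [if_neg hc]
        constructor
        · rintro (⟨h1, h2⟩ | ⟨h1, h2⟩)
          · have := (ih cs (fun c hc => hnd c (by simp [hc]))).mp (Or.inl h2)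
            simp [this, h1]
          · have := (ih cs (fun c hc => hnd c (by simp [hc]))).mp (Or.inr h2)
            simp [this, h1]
        · intro h
          cases htc : tok? cs with
          | none => simp [htc] at h
          | some t =>
            simp only [htc, Option.map_some, Option.some.injEq, List.cons.injEq] at h
            obtain ⟨hca, hts⟩ := h
            have := (ih cs (fun c hc => hnd c (by simp [hc]))).mpr (by simp [htc, hts])
            rcases this with h' | h'
            · exact Or.inl ⟨hca.symm, h'⟩
            · exact Or.inr ⟨hca.symm, h'⟩

theorem key_beq (k : String) (t : List Char) : (k == String.ofList t) = decide (t = k.toList) := by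
  by_cases ht : t = k.toList
  · subst ht; simp
  · simp only [ht, decide_false, beq_eq_false_iff_ne, ne_eq]
    intro hk; exact ht (by rw [hk]; simp)

theorem bTable_mk : bTable = PySem.Dict.mk
    [("feat", "feature"), ("fix", "fix"), ("docs", "docs"), ("chore", "chore"),
     ("refactor", "chore"), ("perf", "feature"), ("breaking", "breaking")] := by decide

-- dict lookup characterised as an if-chain on the token
theorem lookup_eq (t : List Char) : bTable.getD (String.ofList t) "chore" =
    if t = "feat".toList then "feature"
    else if t = "fix".toList then "fix"
    else if t = "docs".toList then "docs"
    else if t = "chore".toList then "chore"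
    else if t = "refactor".toList then "chore"
    else if t = "perf".toList then "feature"
    else if t = "breaking".toList then "breaking"
    else "chore" := by
  by_cases h1 : t = "feat".toList
  · subst h1; decide
  by_cases h2 : t = "fix".toList
  · subst h2; decide
  by_cases h3 : t = "docs".toList
  · subst h3; decide
  by_cases h4 : t = "chore".toList
  · subst h4; decide
  by_cases h5 : t = "refactor".toList
  · subst h5; decide
  by_cases h6 : t = "perf".toList
  · subst h6; decide
  by_cases h7 : t = "breaking".toList
  · subst h7; decide
  simp only [h1, h2, h3, h4, h5, h6, h7, if_false]
  rw [bTable_mk]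
  simp only [PySem.Dict.getD, key_beq, PySem.Dict.get?, List.find?]
  rw [decide_eq_false h1, decide_eq_false h2, decide_eq_false h3, decide_eq_false h4,
      decide_eq_false h5, decide_eq_false h6, decide_eq_false h7]
  rfl

theorem main_eq (s : String) : aLoop s aPairs = bLoop s.toList [] := by
  rw [bLoop_eq]
  have cond : ∀ (p : String), (∀ c ∈ p.toList, ¬(c = ':' ∨ c = '(')) →
      (PySem.Str.startswith s (p ++ ":") || PySem.Str.startswith s (p ++ "(")) =
      decide (tok? s.toList = some p.toList) := by
    intro p hp
    have hiff := prefix_iff p.toList s.toList hp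
    have hsw : ∀ (d : String), (p ++ d).toList = p.toList ++ d.toList := by simp
    rcases Bool.eq_false_or_eq_true (PySem.Str.startswith s (p ++ ":") || PySem.Str.startswith s (p ++ "(")) with h | h
    · rw [h, eq_comm, decide_eq_true_eq]
      apply hiff.mp
      rcases Bool.or_eq_true_iff.mp h with h' | h'
      · left; simp [PySem.Chars.startswith_iff] at h'; simpa using h'
      · right; simp [PySem.Chars.startswith_iff] at h'; simpa using h'
    · rw [h, eq_comm, decide_eq_false_iff_not]
      intro hsome
      simp only [Bool.or_eq_false_iff] at h
      rcases hiff.mpr hsome with h' | h'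
      · have hb : PySem.Chars.startswith s.toList (p.toList ++ [':']) = true := by
          rw [PySem.Chars.startswith_iff]; exact h'
        have hf : PySem.Chars.startswith s.toList (p.toList ++ [':']) = false := by
          simpa using h.1
        rw [hf] at hb; exact Bool.false_ne_true hb
      · have hb : PySem.Chars.startswith s.toList (p.toList ++ ['(']) = true := by
          rw [PySem.Chars.startswith_iff]; exact h'
        have hf : PySem.Chars.startswith s.toList (p.toList ++ ['(']) = false := by
          simpa using h.2
        rw [hf] at hb; exact Bool.false_ne_true hb
  simp only [aPairs, aLoop]
  rw [cond "feat" (by simp), cond "fix" (by simp), cond "docs" (by simp),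
      cond "chore" (by simp), cond "refactor" (by simp), cond "perf" (by simp),
      cond "breaking" (by simp)]
  cases htc : tok? s.toList with
  | none => simp
  | some t =>
    simp only [Option.some.injEq, decide_eq_true_eq, List.nil_append, lookup_eq t]

-- ===== VERDICT (by name: the statement is the Claim_ definition above) =====
theorem infer_type_from_subject_py_spec : Claim_equal_infer_type_from_subject_py := by
  intro subject _
  unfold Spec_infer_type_from_subject_py infer_type_from_subject_py infer_type_from_subject_py_alt
  exact main_eq _
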